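-- pv_equiv track=rewrite | github.com/epfl-ada/ada-2024-project-the5outliers | src/helpers.py | check_voyage_status
-- ===== SOURCE A (Python) =====
-- def check_voyage_status(category_path, finished, n):
--     """
--     Check is the category path is voyage or not voyage, that is wether the first n categories visited are 'Geography' or 'Countries'
--
--     Parameters:
--         category_paths (DataFrame): DataFrame with 'Category Path' column
--         finished (Boolean): whether it is a finished or not-finished path
--         n (int): number of different categories following the first to consider
--
--     Returns:
--         Boolean : is the path of category a voyage
--     """
--     # Split the category path
--     categories = category_path.split(' -> ')
--     path_len = len(categories)
--
--     if finished :
--         # Case 1: Path with 1 category -> always False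
--         if path_len <= 2:
--             return False
--         # Case 2: Path length between 3 and n+2 -> check middle categories
--         elif 2 < path_len <= n + 2:
--             return any(category in categories[1:-1] for category in ['Geography', 'Countries'])
--         # Case 3: Path longer than n+2 -> check the first n categories after the first
--         else:
--             return any(category in categories[1:n+1] for category in ['Geography', 'Countries'])
--
--     else :
--         # Case 1: Path with 1 or 2 categories -> always False
--         if path_len <= 1:
--             return False
--         # Case 2: Path length between 3 and n+2 -> check middle categories
--         elif 1 < path_len <= n + 1:
--             return any(category in categories[1:] for category in ['Geography', 'Countries'])
--         # Case 3: Path longer than n+2 -> check the first n categories after the first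
--         else:
--             return any(category in categories[1:n+1] for category in ['Geography', 'Countries'])
-- ===== SOURCE B (Python) =====
-- def check_voyage_status(category_path, finished, n):
--     # Single early-exit scan with a countdown budget instead of branching on
--     # path length and slicing: drop the first category, drop the last when the
--     # path is finished, then walk the remaining categories while budget lasts.
--     tokens = category_path.split(' -> ')[1:]
--     if finished and tokens:
--         tokens.pop()
--     remaining = n
--     for token in tokens:
--         if remaining <= 0:
--             return False
--         if token == 'Geography' or token == 'Countries':
--             return True
--         remaining -= 1
--     return False
-- ===== Notes on version B (the rewrite author's own statement) =====
-- stated objective: simpler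
-- what changed: Replaces A's five-way branch over path length plus per-target membership tests on three different slices by a single early-exit scan: strip the first (and, if finished, the last) category once, then walk the remaining categories with a countdown budget n, returning True at the first 'Geography'/'Countries' hit.
-- intended difference: For n <= -2 on paths long enough that Python wraps the negative slice bound n+1 to the end of the list, A accidentally scans categories[1:len+n+1] and returns True when it contains 'Geography' or 'Countries'; B checks the first n (i.e. zero) categories after the first and returns False, the intended value since a negative count of categories to consider means nothing to check. — e.g. on check_voyage_status("A -> Geography -> B", false, -2): A returns true, B returns false
import Mathlib
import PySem

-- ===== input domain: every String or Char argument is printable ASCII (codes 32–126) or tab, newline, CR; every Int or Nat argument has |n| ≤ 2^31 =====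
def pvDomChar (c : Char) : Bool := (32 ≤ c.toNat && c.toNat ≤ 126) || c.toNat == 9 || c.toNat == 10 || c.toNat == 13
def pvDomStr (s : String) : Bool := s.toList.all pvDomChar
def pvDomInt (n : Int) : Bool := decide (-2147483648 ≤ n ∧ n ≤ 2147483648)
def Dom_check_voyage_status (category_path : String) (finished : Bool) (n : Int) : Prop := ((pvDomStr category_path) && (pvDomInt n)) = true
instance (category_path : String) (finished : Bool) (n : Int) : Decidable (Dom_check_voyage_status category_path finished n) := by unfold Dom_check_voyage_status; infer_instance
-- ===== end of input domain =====

-- B replaces A's five-way length branch with three slices by one early-exit countdown scan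
-- over the trimmed token list; objective: simpler. On n ≤ -2 (negative-slice wraparound in A)
-- B intentionally differs, see D_ below.

-- ===== PORT A =====
def check_voyage_status (category_path : String) (finished : Bool) (n : Int) : Bool :=
  let categories := (PySem.Str.split? category_path " -> ").getD []
  let path_len : Int := categories.length
  if finished then
    if path_len ≤ 2 then false
    else if 2 < path_len ∧ path_len ≤ n + 2 then
      ["Geography", "Countries"].any (fun category =>
        (PySem.List.slice categories (some 1) (some (-1))).contains category)
    else
      ["Geography", "Countries"].any (fun category =>
        (PySem.List.slice categories (some 1) (some (n + 1))).contains category)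
  else
    if path_len ≤ 1 then false
    else if 1 < path_len ∧ path_len ≤ n + 1 then
      ["Geography", "Countries"].any (fun category =>
        (PySem.List.slice categories (some 1) none).contains category)
    else
      ["Geography", "Countries"].any (fun category =>
        (PySem.List.slice categories (some 1) (some (n + 1))).contains category)

-- ===== PORT B =====
-- the for-loop of Source B: early-exit scan with a countdown budget
def scanVoyage : List String → Int → Bool
  | [], _ => false
  | token :: rest, remaining =>
    if remaining ≤ 0 then false
    else if token == "Geography" || token == "Countries" then true
    else scanVoyage rest (remaining - 1)

def check_voyage_status_alt (category_path : String) (finished : Bool) (n : Int) : Bool :=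
  let tokens := PySem.List.slice ((PySem.Str.split? category_path " -> ").getD []) (some 1) none
  let tokens := if finished && !(tokens == []) then tokens.dropLast else tokens
  scanVoyage tokens n

-- ===== PRECONDITION & SPEC =====
-- For n ≤ -2 on paths long enough that Python wraps the negative slice bound n+1 to the end of
-- the list, A accidentally scans categories[1:len+n+1] and returns True when it contains
-- 'Geography' or 'Countries'; B checks the first n (i.e. zero) categories after the first and
-- returns False, the intended value since a negative count means nothing to check.
def D_check_voyage_status (category_path : String) (finished : Bool) (n : Int) : Prop :=
  let v := ((PySem.Str.split? category_path " -> ").getD []).drop 1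
  n ≤ -2 ∧ ∃ c ∈ v.take (v.length - (n.natAbs - 1)), c = "Geography" ∨ c = "Countries"
instance (category_path : String) (finished : Bool) (n : Int) : Decidable (D_check_voyage_status category_path finished n) := by unfold D_check_voyage_status; infer_instance

def Spec_check_voyage_status (category_path : String) (finished : Bool) (n : Int) (out : Bool) : Prop := ¬ D_check_voyage_status category_path finished n → out = check_voyage_status_alt category_path finished n
instance (category_path : String) (finished : Bool) (n : Int) (out : Bool) : Decidable (Spec_check_voyage_status category_path finished n out) := by unfold Spec_check_voyage_status; infer_instance

def pvDiffWitness_check_voyage_status : String × Bool × Int := ("A -> Geography -> B", false, -2)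
def pvDiffWitnessOut_check_voyage_status : Bool × Bool := (true, false)

-- ===== CLAIM =====
def Claim_unchanged_check_voyage_status : Prop := ∀ (category_path : String) (finished : Bool) (n : Int), Dom_check_voyage_status category_path finished n → Spec_check_voyage_status category_path finished n (check_voyage_status category_path finished n)
def Claim_changed_check_voyage_status : Prop := Dom_check_voyage_status (pvDiffWitness_check_voyage_status.1) (pvDiffWitness_check_voyage_status.2.1) (pvDiffWitness_check_voyage_status.2.2) ∧ D_check_voyage_status (pvDiffWitness_check_voyage_status.1) (pvDiffWitness_check_voyage_status.2.1) (pvDiffWitness_check_voyage_status.2.2) ∧ check_voyage_status (pvDiffWitness_check_voyage_status.1) (pvDiffWitness_check_voyage_status.2.1) (pvDiffWitness_check_voyage_status.2.2) = pvDiffWitnessOut_check_voyage_status.1 ∧ check_voyage_status_alt (pvDiffWitness_check_voyage_status.1) (pvDiffWitness_check_voyage_status.2.1) (pvDiffWitness_check_voyage_status.2.2) = pvDiffWitnessOut_check_voyage_status.2 ∧ pvDiffWitnessOut_check_voyage_status.1 ≠ pvDiffWitnessOut_check_voyage_status.2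
def Claim_exact_check_voyage_status : Prop := ∀ (category_path : String) (finished : Bool) (n : Int), Dom_check_voyage_status category_path finished n → D_check_voyage_status category_path finished n → check_voyage_status category_path finished n ≠ check_voyage_status_alt category_path finished n

-- ===== LEMMAS AND PROOFS =====

theorem scan_nonpos (l : List String) (r : Int) (h : r ≤ 0) : scanVoyage l r = false := by
  cases l with
  | nil => rfl
  | cons t ts => simp [scanVoyage, h]

theorem scan_eq_take_any (l : List String) (r : Int) :
    scanVoyage l r = (l.take r.toNat).any (fun c => c == "Geography" || c == "Countries") := by
  induction l generalizing r with
  | nil => simp [scanVoyage]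
  | cons t ts ih =>
    by_cases h : r ≤ 0
    · have : r.toNat = 0 := by omega
      simp [scanVoyage, h, this]
    · have hr : r.toNat = (r - 1).toNat + 1 := by omega
      rw [hr]
      simp only [scanVoyage, if_neg h, List.take_succ_cons, List.any_cons, ← ih]
      cases hb : (t == "Geography" || t == "Countries") <;> simp

theorem str_beq_comm (a b : String) : (a == b) = (b == a) := by
  rw [Bool.eq_iff_iff]; simp only [beq_iff_eq]; exact eq_comm

theorem pair_any_eq (l : List String) :
    (["Geography", "Countries"].any (fun category => l.contains category))
      = l.any (fun c => c == "Geography" || c == "Countries") := by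
  simp only [List.any_cons, List.any_nil, Bool.or_false]
  induction l with
  | nil => rfl
  | cons x t ih =>
    simp only [List.contains_cons, List.any_cons, ← ih]
    rw [str_beq_comm "Geography" x, str_beq_comm "Countries" x]
    cases x == "Geography" <;> cases x == "Countries" <;> simp

theorem slice_one_none (xs : List String) :
    PySem.List.slice xs (some 1) none = xs.drop 1 := by
  simp [PySem.List.slice, PySem.List.clampIdx]
  cases xs with
  | nil => rfl
  | cons t ts => simp [List.take_of_length_le]

theorem slice_pos_stop (xs : List String) (n : Int) (h0 : 0 ≤ n) (hL : n + 1 ≤ (xs.length : Int)) :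
    PySem.List.slice xs (some 1) (some (n + 1)) = (xs.drop 1).take n.toNat := by
  have h1 : ¬ (n + 1 < 0) := by omega
  have h2 : ¬ ((1:Int) < 0) := by omega
  simp only [PySem.List.slice, PySem.List.clampIdx, if_neg h1, if_neg h2]
  have e1 : min (n + 1).toNat xs.length = (n + 1).toNat := by omega
  have e2 : min (1:Int).toNat xs.length = 1 := by omega
  rw [e1, e2]
  have e3 : (n + 1).toNat - 1 = n.toNat := by omega
  rw [e3]

theorem slice_neg_region (xs : List String) (n : Int) (hn : n + 1 < 0) :
    PySem.List.slice xs (some 1) (some (n + 1)) = (xs.drop 1).take ((xs.length : Int) + n).toNat := by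
  have h2 : ¬ ((1:Int) < 0) := by omega
  simp only [PySem.List.slice, PySem.List.clampIdx, if_pos hn, if_neg h2]
  cases xs with
  | nil => simp
  | cons t ts =>
    have e2 : min (1:Int).toNat (t :: ts).length = 1 := by simp
    rw [e2]
    by_cases hc : ((t :: ts).length : Int) + (n + 1) < 0
    · rw [if_pos hc]
      have e0 : (((t :: ts).length : Int) + n).toNat = 0 := by omega
      simp only [e0, Nat.zero_sub, List.take_zero]
    · rw [if_neg hc]
      have e3 : (((t :: ts).length : Int) + (n + 1)).toNat - 1 = (((t :: ts).length : Int) + n).toNat := by omega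
      rw [e3]

theorem slice_neg_one (xs : List String) (hL : 2 < (xs.length : Int)) :
    PySem.List.slice xs (some 1) (some (-1)) = (xs.drop 1).dropLast := by
  have h1 : (-1 : Int) < 0 := by omega
  have h2 : ¬ ((1:Int) < 0) := by omega
  simp only [PySem.List.slice, PySem.List.clampIdx, if_pos h1, if_neg h2]
  have e2 : min (1:Int).toNat xs.length = 1 := by omega
  rw [e2]
  have hc : ¬ ((xs.length : Int) + -1 < 0) := by omega
  rw [if_neg hc]
  have e3 : ((xs.length : Int) + -1).toNat - 1 = (xs.drop 1).length - 1 := by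
    simp only [List.length_drop]; omega
  rw [e3, List.dropLast_eq_take]

theorem region_eq (xs : List String) (n : Int) (hn : n ≤ -2) :
    (xs.drop 1).take ((xs.length : Int) + n).toNat
      = (xs.drop 1).take ((xs.drop 1).length - (n.natAbs - 1)) := by
  congr 1
  simp only [List.length_drop]
  omega

theorem tokens_finished (l : List String) :
    (if true && !(l == []) then l.dropLast else l) = l.dropLast := by
  cases l <;> simp

theorem check_voyage_status_core (xs : List String) (finished : Bool) (n : Int)
    (hD : ¬ (n ≤ -2 ∧
      (((xs.drop 1).take ((xs.length : Int) + n).toNat).any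
        (fun c => c == "Geography" || c == "Countries")) = true)) :
    (let path_len : Int := xs.length
     if finished then
       if path_len ≤ 2 then false
       else if 2 < path_len ∧ path_len ≤ n + 2 then
         ["Geography", "Countries"].any (fun category =>
           (PySem.List.slice xs (some 1) (some (-1))).contains category)
       else
         ["Geography", "Countries"].any (fun category =>
           (PySem.List.slice xs (some 1) (some (n + 1))).contains category)
     else
       if path_len ≤ 1 then false
       else if 1 < path_len ∧ path_len ≤ n + 1 then
         ["Geography", "Countries"].any (fun category =>
           (PySem.List.slice xs (some 1) none).contains category)
       else
         ["Geography", "Countries"].any (fun category =>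
           (PySem.List.slice xs (some 1) (some (n + 1))).contains category))
    = (let tokens := PySem.List.slice xs (some 1) none
       let tokens := if finished && !(tokens == []) then tokens.dropLast else tokens
       scanVoyage tokens n) := by
  simp only [slice_one_none, scan_eq_take_any]
  have hlen : (xs.drop 1).length = xs.length - 1 := by simp
  cases finished
  · -- unfinished
    simp only [Bool.false_and, Bool.false_eq_true, if_false]
    split_ifs with h1 h2
    · -- path_len ≤ 1
      have : xs.drop 1 = [] := by
        cases xs with
        | nil => rfl
        | cons t ts => simp at h1 ⊢; omega
      simp [this]
    · -- 1 < L ≤ n + 1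
      rw [pair_any_eq, List.take_of_length_le]
      omega
    · -- else
      by_cases hn : 0 ≤ n
      · by_cases hL : n + 1 ≤ (xs.length : Int)
        · rw [pair_any_eq, slice_pos_stop xs n hn hL]
        · exact absurd ⟨by omega, by omega⟩ h2
      · by_cases hn1 : n = -1
        · subst hn1
          rw [pair_any_eq]
          have e : (-1 : Int) + 1 = 0 := by norm_num
          rw [e]
          have hs : PySem.List.slice xs (some 1) (some 0) = [] := by
            simp [PySem.List.slice, PySem.List.clampIdx]
          have h0 : (-1 : Int).toNat = 0 := rfl
          simp [hs, h0]
        · have hn2 : n ≤ -2 := by omega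
          rw [pair_any_eq, slice_neg_region xs n (by omega)]
          have hB : ((xs.drop 1).take n.toNat).any (fun c => c == "Geography" || c == "Countries") = false := by
            have : n.toNat = 0 := by omega
            simp [this]
          rw [hB]
          by_cases hx : ((xs.drop 1).take ((xs.length : Int) + n).toNat).any (fun c => c == "Geography" || c == "Countries") = true
          · exact absurd ⟨hn2, hx⟩ hD
          · simpa using hx
  · -- finished
    simp only [if_true, tokens_finished]
    split_ifs with h1 h2
    · -- path_len ≤ 2
      have : (xs.drop 1).dropLast = [] := by
        have : (xs.drop 1).dropLast.length = 0 := by simp; omega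
        exact List.eq_nil_of_length_eq_zero this
      rw [this]
      simp
    · -- 2 < L ≤ n + 2
      rw [pair_any_eq, slice_neg_one xs (by omega), List.take_of_length_le]
      simp only [List.length_dropLast, hlen]
      omega
    · -- else
      by_cases hn : 0 ≤ n
      · by_cases hL : n + 1 ≤ (xs.length : Int)
        · rw [pair_any_eq, slice_pos_stop xs n hn hL]
          have : n + 2 < (xs.length : Int) := by omega
          rw [List.dropLast_eq_take, List.take_take]
          congr 1
          simp only [hlen, Nat.min_def]
          split_ifs with hmin
          · rfl
          · exact absurd (by omega : n.toNat ≤ xs.length - 1 - 1) hmin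
        · exact absurd ⟨by omega, by omega⟩ h2
      · by_cases hn1 : n = -1
        · subst hn1
          rw [pair_any_eq]
          have e : (-1 : Int) + 1 = 0 := by norm_num
          rw [e]
          have hs : PySem.List.slice xs (some 1) (some 0) = [] := by
            simp [PySem.List.slice, PySem.List.clampIdx]
          have h0 : (-1 : Int).toNat = 0 := rfl
          simp [hs, h0]
        · have hn2 : n ≤ -2 := by omega
          rw [pair_any_eq, slice_neg_region xs n (by omega)]
          have hB : (((xs.drop 1).dropLast).take n.toNat).any (fun c => c == "Geography" || c == "Countries") = false := by
            have : n.toNat = 0 := by omega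
            simp [this]
          rw [hB]
          by_cases hx : ((xs.drop 1).take ((xs.length : Int) + n).toNat).any (fun c => c == "Geography" || c == "Countries") = true
          · exact absurd ⟨hn2, hx⟩ hD
          · simpa using hx

theorem check_voyage_status_spec : Claim_unchanged_check_voyage_status := by
  intro category_path finished n _ hD
  simp only [D_check_voyage_status] at hD
  unfold check_voyage_status check_voyage_status_alt
  refine check_voyage_status_core ((PySem.Str.split? category_path " -> ").getD []) finished n (fun h => hD ⟨h.1, ?_⟩)
  have hany := h.2
  rw [region_eq _ n h.1] at hany
  simpa [List.any_eq_true, beq_iff_eq, Bool.or_eq_true] using hany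

theorem check_voyage_status_changed : Claim_changed_check_voyage_status := by unfold Claim_changed_check_voyage_status; decide

theorem check_voyage_status_tight : Claim_exact_check_voyage_status := by
  intro category_path finished n _ hD
  simp only [D_check_voyage_status] at hD
  obtain ⟨hn, hex⟩ := hD
  set xs := (PySem.Str.split? category_path " -> ").getD [] with hxs
  have hany : ((xs.drop 1).take ((xs.length : Int) + n).toNat).any
      (fun c => c == "Geography" || c == "Countries") = true := by
    rw [region_eq xs n hn]
    simpa [List.any_eq_true, beq_iff_eq, Bool.or_eq_true] using hex
  have hpos : 1 ≤ (xs.length : Int) + n := by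
    by_contra h
    have : ((xs.length : Int) + n).toNat = 0 := by omega
    simp [this] at hany
  have hL : 3 ≤ (xs.length : Int) := by omega
  have hA : check_voyage_status category_path finished n = true := by
    unfold check_voyage_status
    rw [← hxs]
    cases finished
    · simp only [Bool.false_eq_true, if_false]
      rw [if_neg (by omega), if_neg (by omega), pair_any_eq, slice_neg_region xs n (by omega)]
      exact hany
    · simp only [if_true]
      rw [if_neg (by omega), if_neg (by omega), pair_any_eq, slice_neg_region xs n (by omega)]
      exact hany
  have hB : check_voyage_status_alt category_path finished n = false := by
    unfold check_voyage_status_alt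
    exact scan_nonpos _ n (by omega)
  rw [hA, hB]
  simp
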